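-- pv_equiv track=rewrite | github.com/CryptoExperts/AC25-cardinal-rp-compiler | complexity.py | comp_MatMult_JMB24
-- ===== SOURCE A (Python) =====
-- def comp_ref_JMB24 (n) :
--   """
--   Complexity (random, addition) of the SR-SNI gadget used in JMB24.
--
--   Args:
--     n (int): Number of shares.
--
--   Returns:
--     Complexity of the refresh gadget.
--   """
--
--   nb_add = n**2 - n
--   nb_rand = int(nb_add / 2)
--
--   return nb_rand, nb_add
--
-- def comp_MatMult_JMB24 (nx, ny) :
--   """
--   Complexity (random, addition, multiplication) of the MatMult step of the
--   multiplication gadget of JMB24.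
--
--   Args:
--     nx (int): Number of shares for the 1st secret of the multiplication gadget.
--     ny (int): Number of shares for the 2nd secret of the multiplication gadget.
--
--   Returns:
--     Comlpexity of MatMult.
--   """
--   if nx == 1 and ny == 1 :
--     nb_rand = 0
--     nb_add = 0
--     nb_mult = 1
--     return nb_rand, nb_add, nb_mult
--
--   else :
--     nb_rand = 0
--     nb_add = 0
--     nb_mult = 0
--
--     nxhl = nx // 2
--     nxhr = nx - nxhl
--     nyhl = ny // 2
--     nyhr = ny - nyhl
--
--     nb_rand_nxhl, nb_add_nxhl = comp_ref_JMB24(nxhl)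
--     nb_rand_nyhl, nb_add_nyhl = comp_ref_JMB24(nyhl)
--     nb_rand_nxhr, nb_add_nxhr = comp_ref_JMB24(nxhr)
--     nb_rand_nyhr, nb_add_nyhr = comp_ref_JMB24(nyhr)
--
--     if nxhl != 0 and nyhl != 0 :
--       nb_rand_rec, nb_add_rec, nb_mult_rec = comp_MatMult_JMB24 (nxhl, nyhl)
--
--       nb_rand += nb_rand_nxhl + nb_rand_nyhl + nb_rand_rec
--       nb_add += nb_add_nxhl + nb_add_nyhl + nb_add_rec
--       nb_mult += nb_mult_rec
--
--     if nxhl != 0 :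
--       nb_rand_rec, nb_add_rec, nb_mult_rec = comp_MatMult_JMB24 (nxhl, nyhr)
--
--       nb_rand += nb_rand_nxhl + nb_rand_nyhr + nb_rand_rec
--       nb_add += nb_add_nxhl + nb_add_nyhr + nb_add_rec
--       nb_mult += nb_mult_rec
--
--     if nyhl != 0 :
--       nb_rand_rec, nb_add_rec, nb_mult_rec = comp_MatMult_JMB24 (nxhr, nyhl)
--
--       nb_rand += nb_rand_nxhr + nb_rand_nyhl + nb_rand_rec
--       nb_add += nb_add_nxhr + nb_add_nyhl + nb_add_rec
--       nb_mult += nb_mult_rec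
--
--     nb_rand_rec, nb_add_rec, nb_mult_rec = comp_MatMult_JMB24 (nxhr, nyhr)
--
--     nb_rand += nb_rand_nxhr + nb_rand_nyhr + nb_rand_rec
--     nb_add += nb_add_nxhr + nb_add_nyhr + nb_add_rec
--     nb_mult += nb_mult_rec
--
--     return nb_rand, nb_add, nb_mult
-- ===== SOURCE B (Python) =====
-- def comp_MatMult_JMB24(nx, ny):
--     """Memoized reformulation: the halving recursion only ever reaches
--     O(log nx * log ny) distinct (x, y) pairs, so a memo dict makes it fast."""
--     memo = {}
--
--     def go(x, y):
--         v = memo.get((x, y))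
--         if v is not None:
--             return v
--         if x == 1 and y == 1:
--             v = (0, 0, 1)
--         else:
--             xl, yl = x // 2, y // 2
--             xr, yr = x - xl, y - yl
--             r = a = m = 0
--             for (px, py) in [(px, py) for px in (xl, xr) for py in (yl, yr)
--                              if px != 0 and py != 0]:
--                 rr, ar, mr = go(px, py)
--                 ref = (px * px - px + py * py - py) // 2
--                 r += ref + rr
--                 a += 2 * ref + ar
--                 m += mr
--             v = (r, a, m)
--         memo[(x, y)] = v
--         return v
--
--     return go(nx, ny)
-- ===== Notes on version B (the rewrite author's own statement) =====
-- stated objective: faster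
-- what changed: B memoizes the halving recursion on (x, y) pairs (only O(log nx * log ny) distinct subproblems reachable), iterates the up-to-four live subcalls from one filtered pair list with a combined closed-form refresh term, instead of A's unmemoized 4-way recursion with ~nx*ny calls.
-- outside the precondition, e.g. on comp_MatMult_JMB24(0, 1): A raises RecursionError, B returns (0, 0, 0)
import Mathlib
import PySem

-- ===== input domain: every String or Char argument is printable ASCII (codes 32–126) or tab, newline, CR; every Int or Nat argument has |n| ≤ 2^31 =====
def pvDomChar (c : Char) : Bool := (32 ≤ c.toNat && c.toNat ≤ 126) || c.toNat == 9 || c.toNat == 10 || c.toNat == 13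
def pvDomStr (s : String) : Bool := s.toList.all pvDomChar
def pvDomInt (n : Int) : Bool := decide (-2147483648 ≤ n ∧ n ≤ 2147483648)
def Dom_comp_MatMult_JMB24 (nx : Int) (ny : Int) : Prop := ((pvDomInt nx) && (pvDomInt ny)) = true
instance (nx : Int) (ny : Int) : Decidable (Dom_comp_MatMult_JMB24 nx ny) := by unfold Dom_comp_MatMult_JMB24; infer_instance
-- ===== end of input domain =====

-- B replaces A's unmemoized 4-way halving recursion (~nx*ny calls) by a memoized
-- recursion over the O(log nx * log ny) distinct (x, y) subproblems: asymptotically faster.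

-- ===== PORT A =====
-- comp_ref_JMB24: nb_add = n**2 - n; nb_rand = int(nb_add / 2).  Inside Pre_ every argument n
-- of this helper satisfies 0 <= n <= 2^26, so nb_add is a nonnegative even integer < 2^53:
-- Python's float division nb_add / 2 is exact there and int(nb_add / 2) = nb_add / 2 (exact on Pre_).
def pvRefA (n : Int) : Int × Int :=
  let nbAdd := n * n - n
  (nbAdd / 2, nbAdd)

-- fuel-guarded transliteration of A's recursion; the fuel only makes it total
-- (inside Pre_ the recursion depth is < nx.natAbs + ny.natAbs + 1, so fuel never runs out)
def pvGoA : Nat → Int → Int → Int × Int × Int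
  | 0, _, _ => (0, 0, 0)
  | fuel + 1, nx, ny =>
    if nx = 1 ∧ ny = 1 then (0, 0, 1)
    else
      let nxhl := PySem.Int.floordiv nx 2
      let nxhr := nx - nxhl
      let nyhl := PySem.Int.floordiv ny 2
      let nyhr := ny - nyhl
      let t0 : Int × Int × Int := (0, 0, 0)
      let t1 :=
        if nxhl ≠ 0 ∧ nyhl ≠ 0 then
          (t0.1 + (pvRefA nxhl).1 + (pvRefA nyhl).1 + (pvGoA fuel nxhl nyhl).1,
           t0.2.1 + (pvRefA nxhl).2 + (pvRefA nyhl).2 + (pvGoA fuel nxhl nyhl).2.1,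
           t0.2.2 + (pvGoA fuel nxhl nyhl).2.2)
        else t0
      let t2 :=
        if nxhl ≠ 0 then
          (t1.1 + (pvRefA nxhl).1 + (pvRefA nyhr).1 + (pvGoA fuel nxhl nyhr).1,
           t1.2.1 + (pvRefA nxhl).2 + (pvRefA nyhr).2 + (pvGoA fuel nxhl nyhr).2.1,
           t1.2.2 + (pvGoA fuel nxhl nyhr).2.2)
        else t1
      let t3 :=
        if nyhl ≠ 0 then
          (t2.1 + (pvRefA nxhr).1 + (pvRefA nyhl).1 + (pvGoA fuel nxhr nyhl).1,
           t2.2.1 + (pvRefA nxhr).2 + (pvRefA nyhl).2 + (pvGoA fuel nxhr nyhl).2.1,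
           t2.2.2 + (pvGoA fuel nxhr nyhl).2.2)
        else t2
      (t3.1 + (pvRefA nxhr).1 + (pvRefA nyhr).1 + (pvGoA fuel nxhr nyhr).1,
       t3.2.1 + (pvRefA nxhr).2 + (pvRefA nyhr).2 + (pvGoA fuel nxhr nyhr).2.1,
       t3.2.2 + (pvGoA fuel nxhr nyhr).2.2)

def comp_MatMult_JMB24 (nx : Int) (ny : Int) : List Int :=
  let t := pvGoA (nx.natAbs + ny.natAbs + 1) nx ny
  [t.1, t.2.1, t.2.2]

-- ===== PORT B =====
-- ref = (px*px - px + py*py - py) // 2, the per-pair refresh contribution of Source B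
def pvRefB (p : Int × Int) : Int :=
  PySem.Int.floordiv (p.1 * p.1 - p.1 + p.2 * p.2 - p.2) 2

-- memoized recursion of Source B; memo dict threaded through the loop; fuel only makes it total
def pvGoB : Nat → Int → Int → PySem.Dict (Int × Int) (Int × Int × Int) →
    (Int × Int × Int) × PySem.Dict (Int × Int) (Int × Int × Int)
  | 0, _, _, d => ((0, 0, 0), d)
  | fuel + 1, x, y, d =>
    match d.get? (x, y) with
    | some v => (v, d)
    | none =>
      if x = 1 ∧ y = 1 then ((0, 0, 1), d.insert (x, y) (0, 0, 1))
      else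
        let xl := PySem.Int.floordiv x 2
        let yl := PySem.Int.floordiv y 2
        let parts := ([(xl, yl), (xl, y - yl), (x - xl, yl), (x - xl, y - yl)].filter
          (fun p => p.1 != 0 && p.2 != 0))
        let r := parts.foldl (fun acc p =>
          ((acc.1.1 + pvRefB p + (pvGoB fuel p.1 p.2 acc.2).1.1,
            acc.1.2.1 + 2 * pvRefB p + (pvGoB fuel p.1 p.2 acc.2).1.2.1,
            acc.1.2.2 + (pvGoB fuel p.1 p.2 acc.2).1.2.2),
           (pvGoB fuel p.1 p.2 acc.2).2)) (((0:Int), (0:Int), (0:Int)), d)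
        (r.1, r.2.insert (x, y) r.1)

def comp_MatMult_JMB24_alt (nx : Int) (ny : Int) : List Int :=
  let t := (pvGoB (nx.natAbs + ny.natAbs + 1) nx ny PySem.Dict.empty).1
  [t.1, t.2.1, t.2.2]

-- ===== PRECONDITION & SPEC =====
-- Pre_ excludes nx ≤ 0 or ny ≤ 0, where Python A recurses forever (RecursionError), and
-- nx or ny above 2^27, where A's int(nb_add / 2) goes through float division that can be
-- inexact (and A's unmemoized ~nx*ny-call recursion effectively never returns anyway);
-- inside Pre_ every refresh argument is ≤ 2^26, so the float division is exact.
def Pre_comp_MatMult_JMB24 (nx : Int) (ny : Int) : Prop :=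
  1 ≤ nx ∧ nx ≤ 134217728 ∧ 1 ≤ ny ∧ ny ≤ 134217728
instance (nx : Int) (ny : Int) : Decidable (Pre_comp_MatMult_JMB24 nx ny) := by
  unfold Pre_comp_MatMult_JMB24; infer_instance
def pvWitness_comp_MatMult_JMB24 : Int × Int := (5, 3)

def Spec_comp_MatMult_JMB24 (nx : Int) (ny : Int) (out : List Int) : Prop :=
  out = comp_MatMult_JMB24_alt nx ny
instance (nx : Int) (ny : Int) (out : List Int) : Decidable (Spec_comp_MatMult_JMB24 nx ny out) := by
  unfold Spec_comp_MatMult_JMB24; infer_instance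

-- ===== CLAIM (what is proved, stated in full; the proofs are below) =====
def Claim_equal_comp_MatMult_JMB24 : Prop := ∀ (nx : Int) (ny : Int), Dom_comp_MatMult_JMB24 nx ny → Pre_comp_MatMult_JMB24 nx ny → Spec_comp_MatMult_JMB24 nx ny (comp_MatMult_JMB24 nx ny)
-- ===== LEMMAS AND PROOFS =====

-- canonical value of the recursion (fuel = (x+y).toNat always suffices)
def pvAval (x y : Int) : Int × Int × Int := pvGoA (x + y).toNat x y

theorem pvGoA_fuel (n : Nat) : ∀ (f : Nat) (x y : Int), 1 ≤ x → 1 ≤ y →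
    (x + y).toNat = n → n ≤ f → pvGoA f x y = pvGoA n x y := by
  induction n using Nat.strong_induction_on with
  | _ n IH =>
    intro f x y hx hy hn hf
    have hn2 : 2 ≤ n := by omega
    obtain ⟨k, rfl⟩ : ∃ k, n = k + 1 := ⟨n - 1, by omega⟩
    obtain ⟨g, rfl⟩ : ∃ g, f = g + 1 := ⟨f - 1, by omega⟩
    have ex : PySem.Int.floordiv x 2 = x / 2 :=
      PySem.Int.floordiv_eq_ediv_of_pos (by norm_num)
    have ey : PySem.Int.floordiv y 2 = y / 2 :=
      PySem.Int.floordiv_eq_ediv_of_pos (by norm_num)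
    have key : ∀ a b : Int, 1 ≤ a → 1 ≤ b → (a + b).toNat < k + 1 →
        pvGoA g a b = pvGoA k a b := by
      intro a b ha hb hlt
      have h1 := IH _ hlt g a b ha hb rfl (by omega)
      have h2 := IH _ hlt k a b ha hb rfl (by omega)
      rw [h1, h2]
    by_cases hx1 : x = 1 <;> by_cases hy1 : y = 1
    · subst hx1; subst hy1; simp [pvGoA]
    · -- x = 1, y ≥ 2
      have h3 := key (x - x / 2) (y / 2) (by omega) (by omega) (by omega)
      have h4 := key (x - x / 2) (y - y / 2) (by omega) (by omega) (by omega)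
      have hb : ¬ (x = 1 ∧ y = 1) := by tauto
      have hc1 : ¬ (x / 2 ≠ 0 ∧ y / 2 ≠ 0) := by omega
      have hc2 : ¬ (x / 2 ≠ 0) := by omega
      have hc3 : y / 2 ≠ 0 := by omega
      simp only [pvGoA]
      rw [ex, ey]
      simp only [if_neg hb, if_neg hc1, if_neg hc2, if_pos hc3, h3, h4]
    · -- x ≥ 2, y = 1
      have h2 := key (x / 2) (y - y / 2) (by omega) (by omega) (by omega)
      have h4 := key (x - x / 2) (y - y / 2) (by omega) (by omega) (by omega)
      have hb : ¬ (x = 1 ∧ y = 1) := by tauto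
      have hc1 : ¬ (x / 2 ≠ 0 ∧ y / 2 ≠ 0) := by omega
      have hc2 : x / 2 ≠ 0 := by omega
      have hc3 : ¬ (y / 2 ≠ 0) := by omega
      simp only [pvGoA]
      rw [ex, ey]
      simp only [if_neg hb, if_neg hc1, if_pos hc2, if_neg hc3, h2, h4]
    · -- x ≥ 2, y ≥ 2
      have h1 := key (x / 2) (y / 2) (by omega) (by omega) (by omega)
      have h2 := key (x / 2) (y - y / 2) (by omega) (by omega) (by omega)
      have h3 := key (x - x / 2) (y / 2) (by omega) (by omega) (by omega)
      have h4 := key (x - x / 2) (y - y / 2) (by omega) (by omega) (by omega)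
      have hb : ¬ (x = 1 ∧ y = 1) := by tauto
      have hc1 : x / 2 ≠ 0 ∧ y / 2 ≠ 0 := by omega
      have hc2 : x / 2 ≠ 0 := by omega
      have hc3 : y / 2 ≠ 0 := by omega
      simp only [pvGoA]
      rw [ex, ey]
      simp only [if_neg hb, if_pos hc1, if_pos hc2, if_pos hc3, h1, h2, h3, h4]

theorem pvGoA_eq_aval (f : Nat) (x y : Int) (hx : 1 ≤ x) (hy : 1 ≤ y)
    (hf : (x + y).toNat ≤ f) : pvGoA f x y = pvAval x y :=
  pvGoA_fuel (x + y).toNat f x y hx hy rfl hf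

def pvGood (d : PySem.Dict (Int × Int) (Int × Int × Int)) : Prop :=
  ∀ a b v, d.get? (a, b) = some v → v = pvAval a b

theorem pvHalf (a : Int) : ∃ t, a * a - a = t + t := by
  obtain ⟨t, ht⟩ := Int.even_mul_succ_self (a - 1)
  exact ⟨t, by linear_combination ht⟩

theorem pvRefB_split (a b : Int) : pvRefB (a, b) = (a * a - a) / 2 + (b * b - b) / 2 := by
  obtain ⟨s, hs⟩ := pvHalf a
  obtain ⟨t, ht⟩ := pvHalf b
  unfold pvRefB
  rw [PySem.Int.floordiv_eq_ediv_of_pos (by norm_num)]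
  simp only []
  rw [hs, ht]
  omega

theorem pvRefB_refA (a b : Int) : pvRefB (a, b) = (pvRefA a).1 + (pvRefA b).1 := by
  rw [pvRefB_split]; simp [pvRefA]

theorem pvRefA_snd (a : Int) : (pvRefA a).2 = 2 * (pvRefA a).1 := by
  obtain ⟨t, ht⟩ := pvHalf a
  simp only [pvRefA]
  rw [ht]
  omega

theorem pvGood_insert (d : PySem.Dict (Int × Int) (Int × Int × Int)) (x y : Int)
    (v : Int × Int × Int) (hd : pvGood d) (hv : v = pvAval x y) :
    pvGood (d.insert (x, y) v) := by
  intro a b w hw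
  rw [PySem.Dict.get?_insert] at hw
  by_cases h : ((a, b) : Int × Int) = (x, y)
  · rw [if_pos h] at hw
    obtain ⟨h1, h2⟩ := Prod.mk.injEq .. ▸ h
    cases hw
    subst h1; subst h2
    exact hv
  · rw [if_neg h] at hw
    exact hd a b w hw

theorem pvGood_empty : pvGood PySem.Dict.empty := by
  intro a b v h
  simp [PySem.Dict.get?, PySem.Dict.empty] at h

theorem pvGoB_main (n : Nat) : ∀ (fuel : Nat) (x y : Int)
    (d : PySem.Dict (Int × Int) (Int × Int × Int)), pvGood d → 1 ≤ x → 1 ≤ y →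
    (x + y).toNat = n → n ≤ fuel →
    (pvGoB fuel x y d).1 = pvAval x y ∧ pvGood (pvGoB fuel x y d).2 := by
  induction n using Nat.strong_induction_on with
  | _ n IH =>
    intro fuel x y d hd hx hy hn hf
    have hn2 : 2 ≤ n := by omega
    obtain ⟨k, rfl⟩ : ∃ k, n = k + 1 := ⟨n - 1, by omega⟩
    obtain ⟨g, rfl⟩ : ∃ g, fuel = g + 1 := ⟨fuel - 1, by omega⟩
    cases hmem : d.get? (x, y) with
    | some v =>
      have hv := hd x y v hmem
      constructor
      · simp only [pvGoB, hmem]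
        exact hv
      · simp only [pvGoB, hmem]
        exact hd
    | none =>
      have ex : PySem.Int.floordiv x 2 = x / 2 :=
        PySem.Int.floordiv_eq_ediv_of_pos (by norm_num)
      have ey : PySem.Int.floordiv y 2 = y / 2 :=
        PySem.Int.floordiv_eq_ediv_of_pos (by norm_num)
      by_cases hx1 : x = 1 <;> by_cases hy1 : y = 1
      · -- x = 1, y = 1
        subst hx1; subst hy1
        constructor
        · simp only [pvGoB, hmem]
          norm_num
          decide
        · simp only [pvGoB, hmem]
          norm_num
          exact pvGood_insert d 1 1 (0, 0, 1) hd (by decide)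
      · -- x = 1, y ≥ 2
        subst hx1
        have e0 : PySem.Int.floordiv (1 : Int) 2 = 0 := by rw [ex]; decide
        have hb : ¬ (True ∧ y = 1) := by simp [hy1]
        have hyl : y / 2 ≠ 0 := by omega
        have hyr : y - y / 2 ≠ 0 := by omega
        have b1 : (((y / 2 : Int)) != 0) = true := by simpa [bne_iff_ne] using hyl
        have b2 : (((y - y / 2 : Int)) != 0) = true := by simpa [bne_iff_ne] using hyr
        have b0 : (((1 : Int)) != 0) = true := by decide
        have H1 := IH ((1 + y / 2).toNat) (by omega) g 1 (y / 2) d hd (by norm_num)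
          (by omega) rfl (by omega)
        have H2 := IH ((1 + (y - y / 2)).toNat) (by omega) g 1 (y - y / 2)
          ((pvGoB g 1 (y / 2) d).2) H1.2 (by norm_num) (by omega) rfl (by omega)
        have A3 : pvGoA k 1 (y / 2) = pvAval 1 (y / 2) :=
          pvGoA_eq_aval k 1 (y / 2) (by norm_num) (by omega) (by omega)
        have A4 : pvGoA k 1 (y - y / 2) = pvAval 1 (y - y / 2) :=
          pvGoA_eq_aval k 1 (y - y / 2) (by norm_num) (by omega) (by omega)
        have hmain : (pvGoB (g + 1) 1 y d).1 = pvAval 1 y := by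
          simp only [pvGoB, hmem, e0, ey]
          rw [if_neg hb]
          simp only [sub_zero, List.filter_cons, List.filter_nil, bne_self_eq_false,
            Bool.false_and, b0, b1, b2, Bool.and_self, Bool.true_and, Bool.and_true,
            Bool.false_eq_true, eq_self_iff_true,
            if_true, if_false, List.foldl_cons, List.foldl_nil]
          rw [H1.1, H2.1]
          rw [show pvAval 1 y = pvGoA (k + 1) 1 y from by unfold pvAval; rw [hn]]
          simp only [pvGoA, e0, ey]
          rw [if_neg hb]
          simp only [ne_eq, not_true_eq_false, false_and, if_false, sub_zero]
          rw [if_pos hyl, A3, A4]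
          simp only [pvRefB_refA, pvRefA_snd, Prod.mk.injEq]
          refine ⟨?_, ?_, ?_⟩ <;> first | trivial | ring
        refine ⟨hmain, ?_⟩
        simp only [pvGoB, hmem, e0, ey] at hmain ⊢
        rw [if_neg hb] at hmain ⊢
        simp only [sub_zero, List.filter_cons, List.filter_nil, bne_self_eq_false,
          Bool.false_and, b0, b1, b2, Bool.and_self, Bool.true_and, Bool.and_true,
          Bool.false_eq_true, eq_self_iff_true,
          if_true, if_false, List.foldl_cons, List.foldl_nil] at hmain ⊢
        exact pvGood_insert _ 1 y _ H2.2 hmain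
      · -- x ≥ 2, y = 1
        subst hy1
        have e0 : PySem.Int.floordiv (1 : Int) 2 = 0 := by rw [ey]; decide
        have hb : ¬ (x = 1 ∧ True) := by simp [hx1]
        have hxl : x / 2 ≠ 0 := by omega
        have hxr : x - x / 2 ≠ 0 := by omega
        have b1 : (((x / 2 : Int)) != 0) = true := by simpa [bne_iff_ne] using hxl
        have b2 : (((x - x / 2 : Int)) != 0) = true := by simpa [bne_iff_ne] using hxr
        have b0 : (((1 : Int)) != 0) = true := by decide
        have H1 := IH ((x / 2 + 1).toNat) (by omega) g (x / 2) 1 d hd (by omega)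
          (by norm_num) rfl (by omega)
        have H2 := IH ((x - x / 2 + 1).toNat) (by omega) g (x - x / 2) 1
          ((pvGoB g (x / 2) 1 d).2) H1.2 (by omega) (by norm_num) rfl (by omega)
        have A2 : pvGoA k (x / 2) 1 = pvAval (x / 2) 1 :=
          pvGoA_eq_aval k (x / 2) 1 (by omega) (by norm_num) (by omega)
        have A4 : pvGoA k (x - x / 2) 1 = pvAval (x - x / 2) 1 :=
          pvGoA_eq_aval k (x - x / 2) 1 (by omega) (by norm_num) (by omega)
        have hmain : (pvGoB (g + 1) x 1 d).1 = pvAval x 1 := by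
          simp only [pvGoB, hmem, e0, ex]
          rw [if_neg hb]
          simp only [sub_zero, List.filter_cons, List.filter_nil, bne_self_eq_false,
            Bool.and_false, b0, b1, b2, Bool.and_self, Bool.true_and, Bool.and_true,
            Bool.false_eq_true, eq_self_iff_true,
            if_true, if_false, List.foldl_cons, List.foldl_nil]
          rw [H1.1, H2.1]
          rw [show pvAval x 1 = pvGoA (k + 1) x 1 from by unfold pvAval; rw [hn]]
          simp only [pvGoA, e0, ex]
          rw [if_neg hb]
          simp only [ne_eq, not_true_eq_false, and_false, if_false, sub_zero,
            not_false_eq_true]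
          rw [if_pos hxl, A2, A4]
          simp only [pvRefB_refA, pvRefA_snd, Prod.mk.injEq]
          refine ⟨?_, ?_, ?_⟩ <;> first | trivial | ring
        refine ⟨hmain, ?_⟩
        simp only [pvGoB, hmem, e0, ex] at hmain ⊢
        rw [if_neg hb] at hmain ⊢
        simp only [sub_zero, List.filter_cons, List.filter_nil, bne_self_eq_false,
          Bool.and_false, b0, b1, b2, Bool.and_self, Bool.true_and, Bool.and_true,
          Bool.false_eq_true, eq_self_iff_true,
          if_true, if_false, List.foldl_cons, List.foldl_nil] at hmain ⊢
        exact pvGood_insert _ x 1 _ H2.2 hmain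
      · -- x ≥ 2, y ≥ 2
        have hb : ¬ (x = 1 ∧ y = 1) := by tauto
        have hxl : x / 2 ≠ 0 := by omega
        have hxr : x - x / 2 ≠ 0 := by omega
        have hyl : y / 2 ≠ 0 := by omega
        have hyr : y - y / 2 ≠ 0 := by omega
        have b1 : (((x / 2 : Int)) != 0) = true := by simpa [bne_iff_ne] using hxl
        have b2 : (((x - x / 2 : Int)) != 0) = true := by simpa [bne_iff_ne] using hxr
        have b3 : (((y / 2 : Int)) != 0) = true := by simpa [bne_iff_ne] using hyl
        have b4 : (((y - y / 2 : Int)) != 0) = true := by simpa [bne_iff_ne] using hyr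
        have H1 := IH ((x / 2 + y / 2).toNat) (by omega) g (x / 2) (y / 2) d hd
          (by omega) (by omega) rfl (by omega)
        have H2 := IH ((x / 2 + (y - y / 2)).toNat) (by omega) g (x / 2) (y - y / 2)
          ((pvGoB g (x / 2) (y / 2) d).2) H1.2 (by omega) (by omega) rfl (by omega)
        have H3 := IH ((x - x / 2 + y / 2).toNat) (by omega) g (x - x / 2) (y / 2)
          ((pvGoB g (x / 2) (y - y / 2) (pvGoB g (x / 2) (y / 2) d).2).2) H2.2
          (by omega) (by omega) rfl (by omega)
        have H4 := IH ((x - x / 2 + (y - y / 2)).toNat) (by omega) g (x - x / 2) (y - y / 2)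
          ((pvGoB g (x - x / 2) (y / 2)
            (pvGoB g (x / 2) (y - y / 2) (pvGoB g (x / 2) (y / 2) d).2).2).2) H3.2
          (by omega) (by omega) rfl (by omega)
        have A1 : pvGoA k (x / 2) (y / 2) = pvAval (x / 2) (y / 2) :=
          pvGoA_eq_aval k (x / 2) (y / 2) (by omega) (by omega) (by omega)
        have A2 : pvGoA k (x / 2) (y - y / 2) = pvAval (x / 2) (y - y / 2) :=
          pvGoA_eq_aval k (x / 2) (y - y / 2) (by omega) (by omega) (by omega)
        have A3 : pvGoA k (x - x / 2) (y / 2) = pvAval (x - x / 2) (y / 2) :=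
          pvGoA_eq_aval k (x - x / 2) (y / 2) (by omega) (by omega) (by omega)
        have A4 : pvGoA k (x - x / 2) (y - y / 2) = pvAval (x - x / 2) (y - y / 2) :=
          pvGoA_eq_aval k (x - x / 2) (y - y / 2) (by omega) (by omega) (by omega)
        have hc1 : x / 2 ≠ 0 ∧ y / 2 ≠ 0 := ⟨hxl, hyl⟩
        have hmain : (pvGoB (g + 1) x y d).1 = pvAval x y := by
          simp only [pvGoB, hmem, ex, ey]
          rw [if_neg hb]
          simp only [List.filter_cons, List.filter_nil,
            b1, b2, b3, b4, Bool.and_self, Bool.true_and, Bool.and_true,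
            if_true, if_false, List.foldl_cons, List.foldl_nil]
          rw [H1.1, H2.1, H3.1, H4.1]
          rw [show pvAval x y = pvGoA (k + 1) x y from by unfold pvAval; rw [hn]]
          simp only [pvGoA, ex, ey]
          rw [if_neg hb]
          rw [if_pos hc1, if_pos hxl, if_pos hyl, A1, A2, A3, A4]
          simp only [pvRefB_refA, pvRefA_snd, Prod.mk.injEq]
          refine ⟨?_, ?_, ?_⟩ <;> first | trivial | ring
        refine ⟨hmain, ?_⟩
        simp only [pvGoB, hmem, ex, ey] at hmain ⊢
        rw [if_neg hb] at hmain ⊢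
        simp only [List.filter_cons, List.filter_nil,
          b1, b2, b3, b4, Bool.and_self, Bool.true_and, Bool.and_true,
          if_true, if_false, List.foldl_cons, List.foldl_nil] at hmain ⊢
        exact pvGood_insert _ x y _ H4.2 hmain

-- ===== VERDICT (by name: the statement is the Claim_ definition above) =====
theorem comp_MatMult_JMB24_spec : Claim_equal_comp_MatMult_JMB24 := by
  unfold Claim_equal_comp_MatMult_JMB24
  intro nx ny _ hPre
  obtain ⟨h1, h2, h3, h4⟩ := hPre
  unfold Spec_comp_MatMult_JMB24 comp_MatMult_JMB24 comp_MatMult_JMB24_alt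
  have hfuel : (nx + ny).toNat ≤ nx.natAbs + ny.natAbs + 1 := by omega
  have hA := pvGoA_eq_aval (nx.natAbs + ny.natAbs + 1) nx ny h1 h3 hfuel
  have hB := pvGoB_main ((nx + ny).toNat) (nx.natAbs + ny.natAbs + 1) nx ny
    PySem.Dict.empty pvGood_empty h1 h3 rfl hfuel
  simp only [hA, hB.1]
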